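-- pv_equiv track=rewrite | github.com/Jullios/Compiladores | ReservedWordFunctions.py | variable
-- ===== SOURCE A (Python) =====
-- def variable(tokenlist, idx):
--     steps = 5
--     variablef = False
--     nameVariable = False
--     identificator = False
--     semicolon = False
--     reservedWords = False
--
--     for i in range(0, steps):
--         indice = idx + i
--         if i == 0 and tokenlist[indice][2] == "VARIABLE":
--             variablef = True
--         if i == 1 and tokenlist[indice][0] == "IDENTIFICADOR":
--             verify = any(char.isdigit() for char in tokenlist[indice][2])
--             if verify == True:
--                 a = 0
--                 for i in tokenlist[indice][2]:
--                     if i.isdigit():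
--                         if a == 0:
--                             nameVariable = False
--                             break
--                         else:
--                             nameVariable = True
--                     else:
--                         pass
--                     a += 1
--             else:
--                 nameVariable = True
--         if i == 2 and tokenlist[indice][2] == ":":
--             identificator = True
--         if i == 3 and (tokenlist[indice][2] == "INTEIRO" or tokenlist[indice][2] == "REAL"):
--             reservedWords = True
--         if i == 4 and tokenlist[indice][2] == ";":
--             semicolon = True
--     if variablef and nameVariable and identificator and reservedWords and semicolon:
--         return True, idx + steps
--     else:
--         return False, 0
-- ===== SOURCE B (Python) =====
-- def variable(tokenlist, idx):
--     # Fetch all five tokens up front (same IndexError behaviour as a full scan).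
--     t0 = tokenlist[idx]
--     t1 = tokenlist[idx + 1]
--     t2 = tokenlist[idx + 2]
--     t3 = tokenlist[idx + 3]
--     t4 = tokenlist[idx + 4]
--     name = t1[2]
--     ok = (t0[2] == "VARIABLE"
--           and t1[0] == "IDENTIFICADOR"
--           and not (name != "" and name[0].isdigit())
--           and t2[2] == ":"
--           and t3[2] in ("INTEIRO", "REAL")
--           and t4[2] == ";")
--     return (True, idx + 5) if ok else (False, 0)
-- ===== Notes on version B (the rewrite author's own statement) =====
-- stated objective: simpler
-- what changed: Replaces the 5-step counter loop with dispatch-by-i and the any()+character-scan-with-position-counter leading-digit detection by five direct token checks and a closed-form first-character test (name invalid iff it is nonempty and starts with a digit).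
import Mathlib
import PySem

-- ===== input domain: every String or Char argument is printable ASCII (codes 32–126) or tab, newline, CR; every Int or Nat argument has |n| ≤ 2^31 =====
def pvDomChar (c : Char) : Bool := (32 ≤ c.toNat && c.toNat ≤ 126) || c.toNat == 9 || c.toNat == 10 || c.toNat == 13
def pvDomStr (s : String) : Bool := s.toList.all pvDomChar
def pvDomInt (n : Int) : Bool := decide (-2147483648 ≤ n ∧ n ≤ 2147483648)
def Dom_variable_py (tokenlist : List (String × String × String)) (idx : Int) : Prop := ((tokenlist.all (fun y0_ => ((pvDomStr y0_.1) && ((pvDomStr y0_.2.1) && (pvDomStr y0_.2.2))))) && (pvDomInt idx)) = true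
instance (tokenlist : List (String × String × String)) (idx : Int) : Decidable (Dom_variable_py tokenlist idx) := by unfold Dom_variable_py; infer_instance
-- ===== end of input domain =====

-- B replaces A's 5-step counter loop and two-pass digit scan by five direct token checks
-- with a closed-form leading-digit test (objective: simpler).


-- ===== PORT A =====
-- inner 'for i in tokenlist[indice][2]' loop: counter a, break with False on a leading digit
def pvDigitLoop (cs : List Char) (a : Nat) (nameVariable : Bool) : Bool :=
  match cs with
  | [] => nameVariable
  | c :: rest =>
    if PySem.Chars.isdigit c then
      if a = 0 then false                      -- nameVariable = False; break
      else pvDigitLoop rest (a + 1) true       -- nameVariable = True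
    else pvDigitLoop rest (a + 1) nameVariable -- pass

def variable_py (tokenlist : List (String × String × String)) (idx : Int) : Bool × Int :=
  let steps : Int := 5
  let st :=
    (PySem.List.pyRange 0 steps 1).foldl
      (fun (st : Bool × Bool × Bool × Bool × Bool) i =>
        let (variablef, nameVariable, identificator, semicolon, reservedWords) := st
        let indice := idx + i
        let tok := PySem.List.pyGetD tokenlist indice ("", "", "")  -- in range under Pre_
        let variablef := if i == 0 && tok.2.2 == "VARIABLE" then true else variablef
        let nameVariable :=
          if i == 1 && tok.1 == "IDENTIFICADOR" then
            let verify := tok.2.2.toList.any PySem.Chars.isdigit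
            if verify then pvDigitLoop tok.2.2.toList 0 nameVariable else true
          else nameVariable
        let identificator := if i == 2 && tok.2.2 == ":" then true else identificator
        let reservedWords := if i == 3 && (tok.2.2 == "INTEIRO" || tok.2.2 == "REAL") then true else reservedWords
        let semicolon := if i == 4 && tok.2.2 == ";" then true else semicolon
        (variablef, nameVariable, identificator, semicolon, reservedWords))
      (false, false, false, false, false)
  if st.1 && st.2.1 && st.2.2.1 && st.2.2.2.2 && st.2.2.2.1 then (true, idx + steps) else (false, 0)

-- ===== PORT B =====
def variable_py_alt (tokenlist : List (String × String × String)) (idx : Int) : Bool × Int :=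
  match PySem.List.pyGet? tokenlist idx, PySem.List.pyGet? tokenlist (idx + 1),
        PySem.List.pyGet? tokenlist (idx + 2), PySem.List.pyGet? tokenlist (idx + 3),
        PySem.List.pyGet? tokenlist (idx + 4) with
  | some t0, some t1, some t2, some t3, some t4 =>
    let name := t1.2.2.toList
    let ok := t0.2.2 == "VARIABLE" && t1.1 == "IDENTIFICADOR"
              && !(name ≠ [] && PySem.Chars.isdigit (name.headD ' '))
              && t2.2.2 == ":" && (t3.2.2 == "INTEIRO" || t3.2.2 == "REAL") && t4.2.2 == ";"
    if ok then (true, idx + 5) else (false, 0)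
  | _, _, _, _, _ => (false, 0)   -- unreachable under Pre_ (Python raises IndexError here)

-- ===== PRECONDITION & SPEC =====
-- Pre_ excludes exactly the inputs where the Python raises IndexError: all five
-- accessed indices idx, …, idx+4 must be in range (Python's negative indexing included).
def Pre_variable_py (tokenlist : List (String × String × String)) (idx : Int) : Prop :=
  -(tokenlist.length : Int) ≤ idx ∧ idx + 4 < (tokenlist.length : Int)
instance (tokenlist : List (String × String × String)) (idx : Int) : Decidable (Pre_variable_py tokenlist idx) := by unfold Pre_variable_py; infer_instance
def pvWitness_variable_py : (List (String × String × String)) × Int :=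
  ([("", "", "VARIABLE"), ("IDENTIFICADOR", "", "x1"), ("", "", ":"), ("", "", "REAL"), ("", "", ";")], 0)
def Spec_variable_py (tokenlist : List (String × String × String)) (idx : Int) (out : Bool × Int) : Prop := out = variable_py_alt tokenlist idx
instance (tokenlist : List (String × String × String)) (idx : Int) (out : Bool × Int) : Decidable (Spec_variable_py tokenlist idx out) := by unfold Spec_variable_py; infer_instance

-- ===== CLAIM (what is proved, stated in full; the proofs are below) =====
def Claim_equal_variable_py : Prop := ∀ (tokenlist : List (String × String × String)) (idx : Int), Dom_variable_py tokenlist idx → Pre_variable_py tokenlist idx → Spec_variable_py tokenlist idx (variable_py tokenlist idx)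

-- ===== LEMMAS AND PROOFS =====
-- A's inner scan with counter a ≠ 0 reports: a digit somewhere, or the carried flag.
theorem pvDigitLoop_pos (cs : List Char) (a : Nat) (nv : Bool) (ha : a ≠ 0) :
    pvDigitLoop cs a nv = (nv || cs.any PySem.Chars.isdigit) := by
  induction cs generalizing a nv with
  | nil => simp [pvDigitLoop]
  | cons c rest ih =>
    simp only [pvDigitLoop, List.any_cons]
    by_cases hd : PySem.Chars.isdigit c
    · rw [if_pos hd, if_neg ha, ih _ true (by omega)]; simp [hd]
    · rw [if_neg hd, ih _ nv (by omega)]; simp [hd]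

-- ===== VERDICT (by name: the statement is the Claim_ definition above) =====
theorem variable_py_spec : Claim_equal_variable_py := by
  intro tokenlist idx _ hpre
  obtain ⟨h1, h2⟩ := hpre
  unfold Spec_variable_py variable_py variable_py_alt
  have hget : ∀ i : Int, -(tokenlist.length : Int) ≤ i → i < (tokenlist.length : Int) →
      PySem.List.pyGet? tokenlist i = some (PySem.List.pyGetD tokenlist i ("", "", "")) := by
    intro i hl hr
    cases hx : PySem.List.pyGet? tokenlist i with
    | none =>
      have hn := (PySem.List.pyGet?_eq_none_iff tokenlist i).mp hx
      exact absurd (by simp [PySem.Raise.InRange]; omega) hn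
    | some v => simp [PySem.List.pyGetD, hx]
  rw [hget idx (by omega) (by omega), hget (idx+1) (by omega) (by omega),
      hget (idx+2) (by omega) (by omega), hget (idx+3) (by omega) (by omega),
      hget (idx+4) (by omega) (by omega)]
  simp only [show PySem.List.pyRange 0 5 1 = [0, 1, 2, 3, 4] from by decide, List.foldl]
  simp only [add_zero]
  simp
  have hname : ∀ t : String,
      ((∀ x ∈ t.toList, PySem.Chars.isdigit x = false) ∨ pvDigitLoop t.toList 0 false = true)
        ↔ (t = "" ∨ PySem.Chars.isdigit (t.toList.head?.getD ' ') = false) := by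
    intro t
    have hnil : t = "" ↔ t.toList = [] := by
      constructor
      · intro h; simp [h]
      · intro h; exact String.ext (by simpa using h)
    rw [hnil]
    cases hcs : t.toList with
    | nil => simp
    | cons c rest =>
      by_cases hd : PySem.Chars.isdigit c
      · simp [pvDigitLoop, hd]
      · simp only [pvDigitLoop, hd, Bool.false_eq_true, if_false]
        rw [pvDigitLoop_pos rest 1 false (by omega)]
        by_cases hr : rest.any PySem.Chars.isdigit
        · simp [hr, hd]
        · simp only [List.any_eq_true] at hr
          push Not at hr
          simp [hd]
          exact Or.inl fun a ha => by simpa using hr a ha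
  refine if_congr ?_ rfl rfl
  rw [hname]
  tauto
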